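-- pv_equiv track=rewrite | github.com/Deven-puri/Dynamic-Query-retrival-Model | ROUND_6/almost_equal_index.py | smallest_almost_equal_index
-- ===== SOURCE A (Python) =====
-- def smallest_almost_equal_index(s, pattern):
--     pattern_len = len(pattern)
--     s_len = len(s)
--
--     for i in range(s_len - pattern_len + 1):
--         substring = s[i:i + pattern_len]
--         # Count the differences between substring and pattern
--         diff_count = sum(1 for j in range(pattern_len) if substring[j] != pattern[j])
--         if diff_count <= 1:
--             return i  # Return the starting index if almost equal
--     return -1  # Return -1 if no suitable index is found
-- ===== SOURCE B (Python) =====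
-- def smallest_almost_equal_index(s, pattern):
--     m = len(pattern)
--     w = len(s) - m + 1
--     if w <= 0:
--         return -1
--     counts = [0] * w
--     for j, pj in enumerate(pattern):
--         counts = [c + (1 if s[i + j] != pj else 0) for i, c in enumerate(counts)]
--     for i, c in enumerate(counts):
--         if c <= 1:
--             return i
--     return -1
-- ===== Notes on version B (the rewrite author's own statement) =====
-- stated objective: alternative
-- what changed: A rescans each window with an early return on the first window having <=1 mismatches; B transposes the loops: one sweep per pattern position accumulates a per-start mismatch-count table, then a single final scan picks the first start with count <= 1.
import Mathlib
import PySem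

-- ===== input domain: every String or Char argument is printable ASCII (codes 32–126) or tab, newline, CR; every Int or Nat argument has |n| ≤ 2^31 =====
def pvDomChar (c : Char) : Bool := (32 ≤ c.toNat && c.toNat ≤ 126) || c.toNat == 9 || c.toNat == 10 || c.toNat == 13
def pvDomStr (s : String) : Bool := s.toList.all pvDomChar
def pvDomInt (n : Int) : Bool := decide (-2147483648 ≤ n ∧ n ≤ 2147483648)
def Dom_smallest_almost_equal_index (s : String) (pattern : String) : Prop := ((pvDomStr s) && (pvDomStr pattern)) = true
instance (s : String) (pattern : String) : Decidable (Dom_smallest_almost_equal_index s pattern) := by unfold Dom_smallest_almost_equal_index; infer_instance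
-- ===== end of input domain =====

-- B replaces A's window-by-window rescan (early return on the first window with ≤1 mismatches)
-- by a transposed sweep: one pass per pattern position accumulating a per-start mismatch-count
-- table, then a single scan of the table; objective: alternative (same asymptotic cost).

-- ===== PORT A =====
-- A: for i in range(len(s)-len(pattern)+1): take substring s[i:i+m], count mismatches vs pattern,
-- return i as soon as the count is ≤ 1; -1 if the loop ends.
def aLoop (sl pl : List Char) (idxs : List Int) : Int :=
  match idxs with
  | [] => -1
  | i :: rest =>
      let substring := PySem.List.slice sl (some i) (some (i + (pl.length : Int)))
      let diff : Int := ((PySem.List.pyRange 0 (pl.length : Int) 1).map (fun j =>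
        if PySem.List.pyGet? substring j ≠ PySem.List.pyGet? pl j then (1 : Int) else 0)).sum
      if diff ≤ 1 then i else aLoop sl pl rest

def smallest_almost_equal_index (s : String) (pattern : String) : Int :=
  let pl := pattern.toList
  let sl := s.toList
  aLoop sl pl (PySem.List.pyRange 0 ((sl.length : Int) - (pl.length : Int) + 1) 1)

-- ===== PORT B =====
-- B: counts = [c + (1 if s[i+j] != pj else 0) for i, c in enumerate(counts)]   (one sweep per j)
def bStep (sl : List Char) (j : Int) (pj : Char) (counts : List Int) : List Int :=
  (PySem.List.enumerate counts).map (fun ic =>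
    ic.2 + (if PySem.List.pyGet? sl (ic.1 + j) ≠ some pj then (1 : Int) else 0))

-- B: final scan — first start index whose mismatch count is ≤ 1, else -1
def bFind (pairs : List (Int × Int)) : Int :=
  match pairs with
  | [] => -1
  | (i, c) :: rest => if c ≤ 1 then i else bFind rest

def smallest_almost_equal_index_alt (s : String) (pattern : String) : Int :=
  let pl := pattern.toList
  let sl := s.toList
  let w : Int := (sl.length : Int) - (pl.length : Int) + 1
  if w ≤ 0 then -1
  else
    let counts := (PySem.List.enumerate pl).foldl
      (fun cs jp => bStep sl jp.1 jp.2 cs) (List.replicate w.toNat 0)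
    bFind (PySem.List.enumerate counts)

-- ===== PRECONDITION & SPEC =====
def Spec_smallest_almost_equal_index (s : String) (pattern : String) (out : Int) : Prop := out = smallest_almost_equal_index_alt s pattern
instance (s : String) (pattern : String) (out : Int) : Decidable (Spec_smallest_almost_equal_index s pattern out) := by unfold Spec_smallest_almost_equal_index; infer_instance

-- ===== CLAIM (what is proved, stated in full; the proofs are below) =====
def Claim_equal_smallest_almost_equal_index : Prop := ∀ (s : String) (pattern : String), Dom_smallest_almost_equal_index s pattern → Spec_smallest_almost_equal_index s pattern (smallest_almost_equal_index s pattern)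

-- ===== LEMMAS AND PROOFS =====

-- mismatch count of window starting at i, as a Nat-indexed countP
def mcount (sl pl : List Char) (i : Nat) : Int :=
  ((List.range pl.length).countP (fun j => !(sl[i + j]? == pl[j]?)) : Int)

-- enumerate of a map over List.range
theorem enumerate_map_range {α : Type} (g : Nat → α) (w : Nat) :
    PySem.List.enumerate ((List.range w).map g) 0
      = (List.range w).map (fun (i : Nat) => ((i : Int), g i)) := by
  apply List.ext_getElem?
  intro k
  by_cases hk : k < w
  · simp [PySem.List.getElem_enumerate, hk]
  · simp [hk]

-- one B sweep on a range-shaped table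
theorem bStep_map_range (sl : List Char) (j : Int) (pj : Char) (g : Nat → Int) (w : Nat) :
    bStep sl j pj ((List.range w).map g)
      = (List.range w).map (fun i =>
          g i + (if PySem.List.pyGet? sl ((i : Int) + j) ≠ some pj then (1 : Int) else 0)) := by
  unfold bStep
  rw [enumerate_map_range, List.map_map]
  rfl

-- the whole B fold on a range-shaped table
theorem bFold_map_range (sl : List Char) (L : List (Int × Char)) (g : Nat → Int) (w : Nat) :
    L.foldl (fun cs jp => bStep sl jp.1 jp.2 cs) ((List.range w).map g)
      = (List.range w).map (fun i =>
          g i + (L.countP (fun jp => !(PySem.List.pyGet? sl ((i : Int) + jp.1) == some jp.2)) : Int)) := by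
  induction L generalizing g with
  | nil => simp
  | cons hd tl ih =>
      simp only [List.foldl_cons, bStep_map_range, ih, List.countP_cons]
      apply List.map_congr_left
      intro i _
      by_cases h : PySem.List.pyGet? sl ((i : Int) + hd.1) = some hd.2
      · simp [h]
      · simp [h]; ring

-- B's accumulated count equals the window mismatch count
theorem counts_eq (sl pl : List Char) (i : Nat) :
    ((PySem.List.enumerate pl).countP
        (fun jp => !(PySem.List.pyGet? sl ((i : Int) + jp.1) == some jp.2)) : Int)
      = mcount sl pl i := by
  unfold mcount
  rw [PySem.List.enumerate_eq_map_pyRange pl 'a', PySem.List.len_eq,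
      PySem.List.pyRange_zero_natCast, List.countP_map, List.countP_map]
  norm_cast
  apply List.countP_congr
  intro j hj
  simp only [List.mem_range] at hj
  have h1 : ((i : Int) + (j : Int)) = ((i + j : Nat) : Int) := by push_cast; ring
  have h2 : pl.getD j 'a' = pl[j] := List.getD_eq_getElem pl 'a' hj
  simp only [Function.comp, h1, PySem.List.pyGet?_natCast, PySem.List.pyGetD_natCast, h2,
    List.getElem?_eq_getElem hj]

-- A's per-window diff equals the window mismatch count
theorem diff_eq (sl pl : List Char) (i : Nat) :
    ((PySem.List.pyRange 0 (pl.length : Int) 1).map (fun j =>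
        if PySem.List.pyGet? (PySem.List.slice sl (some (i : Int)) (some ((i : Int) + (pl.length : Int)))) j
             ≠ PySem.List.pyGet? pl j then (1 : Int) else 0)).sum
      = mcount sl pl i := by
  unfold mcount
  rw [PySem.List.slice_natCast_add, PySem.List.pyRange_zero_natCast, List.map_map]
  rw [List.map_congr_left (g := fun (j : Nat) =>
        if (!(sl[i + j]? == pl[j]?)) = true then (1 : Int) else 0) ?_]
  · exact PySem.List.sum_map_ite_one_zero _ _
  · intro j hj
    simp only [List.mem_range] at hj
    have hgt : (List.take pl.length (List.drop i sl))[j]? = sl[i + j]? := by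
      rw [List.getElem?_take_of_lt hj, List.getElem?_drop]
    simp only [Function.comp, PySem.List.pyGet?_natCast, hgt, ne_eq]
    by_cases he : sl[i + j]? = pl[j]? <;> simp [he]

theorem aLoop_cons (sl pl : List Char) (i : Int) (rest : List Int) :
    aLoop sl pl (i :: rest) =
      (if ((PySem.List.pyRange 0 (pl.length : Int) 1).map (fun j =>
          if PySem.List.pyGet? (PySem.List.slice sl (some i) (some (i + (pl.length : Int)))) j
               ≠ PySem.List.pyGet? pl j then (1 : Int) else 0)).sum ≤ 1
        then i else aLoop sl pl rest) := rfl

theorem bFind_cons (i c : Int) (rest : List (Int × Int)) :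
    bFind ((i, c) :: rest) = if c ≤ 1 then i else bFind rest := rfl

-- the two scans agree on any list of start indices
theorem loop_eq (sl pl : List Char) (ks : List Nat) :
    aLoop sl pl (ks.map (fun (i : Nat) => (i : Int)))
      = bFind (ks.map (fun (i : Nat) => ((i : Int), mcount sl pl i))) := by
  induction ks with
  | nil => rfl
  | cons i ks ih =>
      simp only [List.map_cons]
      rw [aLoop_cons, bFind_cons, diff_eq]
      split
      · rfl
      · exact ih

-- A's whole computation equals B's whole computation, over raw character lists
theorem main_eq (sl pl : List Char) :
    aLoop sl pl (PySem.List.pyRange 0 ((sl.length : Int) - (pl.length : Int) + 1) 1)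
      = (if ((sl.length : Int) - (pl.length : Int) + 1) ≤ 0 then (-1 : Int)
         else bFind (PySem.List.enumerate ((PySem.List.enumerate pl).foldl
                (fun cs jp => bStep sl jp.1 jp.2 cs)
                (List.replicate ((sl.length : Int) - (pl.length : Int) + 1).toNat 0)))) := by
  by_cases hw : ((sl.length : Int) - (pl.length : Int) + 1) ≤ 0
  · rw [if_pos hw, PySem.List.pyRange_one_eq_nil hw]
    rfl
  · rw [if_neg hw]
    obtain ⟨wN, hwN⟩ : ∃ wN : Nat, (sl.length : Int) - (pl.length : Int) + 1 = (wN : Int) :=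
      ⟨((sl.length : Int) - (pl.length : Int) + 1).toNat, by omega⟩
    rw [hwN, Int.toNat_natCast]
    have hrep : (List.replicate wN (0 : Int)) = (List.range wN).map (fun _ => (0 : Int)) := by
      simp
    rw [hrep, bFold_map_range]
    simp only [zero_add, counts_eq]
    rw [enumerate_map_range, PySem.List.pyRange_zero_natCast]
    exact loop_eq sl pl (List.range wN)

-- ===== VERDICT (by name: the statement is the Claim_ definition above) =====
theorem smallest_almost_equal_index_spec : Claim_equal_smallest_almost_equal_index := by
  intro s pattern _
  exact main_eq s.toList pattern.toList
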